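-- pv_equiv track=rewrite | github.com/nickzsche/RKS-Secret-System | app.py | shuffle_block_inverse
-- ===== SOURCE A (Python) =====
-- def shuffle_block_inverse(block, expanded_key):
--     block = block.copy()
--     n = len(block)
--     swaps = []
--     for i in range(n):
--         swap_idx = (expanded_key[i % len(expanded_key)] + i) % n
--         swaps.append((i, swap_idx))
--     for i, swap_idx in reversed(swaps):
--         block[i], block[swap_idx] = block[swap_idx], block[i]
--     return block
-- ===== SOURCE B (Python) =====
-- def shuffle_block_inverse(block, expanded_key):
--     # Build the forward shuffle permutation once, then invert it by scattering:
--     # the reversed swap sequence is exactly the inverse of the forward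
--     # permutation, so res[perm[j]] = block[j] reproduces A's output.
--     n = len(block)
--     perm = list(range(n))
--     for i in range(n):
--         s = (expanded_key[i % len(expanded_key)] + i) % n
--         perm[i], perm[s] = perm[s], perm[i]
--     res = [0] * n
--     for j, k in enumerate(perm):
--         res[k] = block[j]
--     return res
-- ===== Notes on version B (the rewrite author's own statement) =====
-- stated objective: alternative
-- what changed: Instead of replaying the n swaps in reverse order on the data, B applies the swaps forward once to an identity index list to obtain the forward shuffle permutation and then inverts that permutation by scattering block[j] into position perm[j]; correctness rests on reversed transposition sequence = inverse permutation.
import Mathlib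
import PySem

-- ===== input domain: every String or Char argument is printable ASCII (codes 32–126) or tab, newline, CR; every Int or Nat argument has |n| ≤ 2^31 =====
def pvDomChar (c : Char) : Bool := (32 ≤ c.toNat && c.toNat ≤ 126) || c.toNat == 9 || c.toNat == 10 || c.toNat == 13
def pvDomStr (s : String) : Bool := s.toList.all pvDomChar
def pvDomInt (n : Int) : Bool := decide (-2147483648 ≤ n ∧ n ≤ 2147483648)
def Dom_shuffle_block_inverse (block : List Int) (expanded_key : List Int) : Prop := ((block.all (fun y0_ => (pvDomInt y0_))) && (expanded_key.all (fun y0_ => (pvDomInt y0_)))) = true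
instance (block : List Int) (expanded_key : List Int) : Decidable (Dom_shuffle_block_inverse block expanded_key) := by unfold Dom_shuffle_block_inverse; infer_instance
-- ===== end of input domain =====

-- B replaces A's reversed replay of the swap sequence by a different algorithm:
-- apply the swaps FORWARD once to an identity index list to get the forward shuffle
-- permutation, then invert that permutation by scattering; objective: alternative.

-- ===== PORT A =====
-- 'block[i], block[swap_idx] = block[swap_idx], block[i]' : RHS evaluated first, then
-- assigned left to right.  Under Pre_ both indices are always in [0, n), so pyGetD's
-- default and '.toNat' are never exercised on out-of-range / negative indices (exact).
def pvSwapPairA (b : List Int) (p : Int × Int) : List Int :=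
  let x := PySem.List.pyGetD b p.2 0
  let y := PySem.List.pyGetD b p.1 0
  ((b.set p.1.toNat x).set p.2.toNat y)

def shuffle_block_inverse (block : List Int) (expanded_key : List Int) : List Int :=
  let n := block.length
  let swaps := (List.range n).map (fun (i : Nat) =>
    ((i : Int),
     PySem.Int.mod (PySem.List.pyGetD expanded_key (PySem.Int.mod (i : Int) (expanded_key.length : Int)) 0 + (i : Int)) (n : Int)))
  swaps.reverse.foldl pvSwapPairA block

-- ===== PORT B =====
-- perm = list(range(n)) with the forward swaps applied ascending; then res[perm[j]] = block[j].
-- Under Pre_ every index used is in [0, n), so pyGetD/toNat are exact as in A.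
def shuffle_block_inverse_alt (block : List Int) (expanded_key : List Int) : List Int :=
  let n := block.length
  let perm := (List.range n).foldl (fun (p : List Int) (i : Nat) =>
    let s := PySem.Int.mod (PySem.List.pyGetD expanded_key (PySem.Int.mod (i : Int) (expanded_key.length : Int)) 0 + (i : Int)) (n : Int)
    let x := PySem.List.pyGetD p s 0
    let y := PySem.List.pyGetD p (i : Int) 0
    ((p.set i x).set s.toNat y)) ((List.range n).map (fun (k : Nat) => (k : Int)))
  (PySem.List.enumerate perm 0).foldl (fun (r : List Int) (jk : Int × Int) =>
    r.set jk.2.toNat (PySem.List.pyGetD block jk.1 0)) (List.replicate n 0)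

-- ===== PRECONDITION & SPEC =====
-- Pre_ excludes only the inputs where Python A raises ZeroDivisionError
-- (empty expanded_key with a nonempty block); B raises there too.
def Pre_shuffle_block_inverse (block : List Int) (expanded_key : List Int) : Prop :=
  expanded_key ≠ [] ∨ block = []
instance (block : List Int) (expanded_key : List Int) : Decidable (Pre_shuffle_block_inverse block expanded_key) := by unfold Pre_shuffle_block_inverse; infer_instance

def pvWitness_shuffle_block_inverse : List Int × List Int := ([3, 1, 4, 1, 5], [2, 7])

def Spec_shuffle_block_inverse (block : List Int) (expanded_key : List Int) (out : List Int) : Prop := out = shuffle_block_inverse_alt block expanded_key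
instance (block : List Int) (expanded_key : List Int) (out : List Int) : Decidable (Spec_shuffle_block_inverse block expanded_key out) := by unfold Spec_shuffle_block_inverse; infer_instance

-- ===== CLAIM (what is proved, stated in full; the proofs are below) =====
def Claim_equal_shuffle_block_inverse : Prop := ∀ (block : List Int) (expanded_key : List Int), Dom_shuffle_block_inverse block expanded_key → Pre_shuffle_block_inverse block expanded_key → Spec_shuffle_block_inverse block expanded_key (shuffle_block_inverse block expanded_key)

-- ===== LEMMAS AND PROOFS =====

-- Generic theory of a sequence of in-range transpositions applied by foldl.
def swG {α : Type} (d : α) (b : List α) (p : Nat × Nat) : List α :=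
  (b.set p.1 (b.getD p.2 d)).set p.2 (b.getD p.1 d)

def appG {α : Type} (d : α) (L : List (Nat × Nat)) (b : List α) : List α :=
  L.foldl (swG d) b

theorem length_swG {α : Type} (d : α) (b : List α) (p : Nat × Nat) :
    (swG d b p).length = b.length := by simp [swG]

theorem appG_cons {α : Type} (d : α) (p : Nat × Nat) (L : List (Nat × Nat)) (b : List α) :
    appG d (p :: L) b = appG d L (swG d b p) := rfl

theorem appG_append {α : Type} (d : α) (L1 L2 : List (Nat × Nat)) (b : List α) :
    appG d (L1 ++ L2) b = appG d L2 (appG d L1 b) := by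
  simp [appG, List.foldl_append]

theorem length_appG {α : Type} (d : α) (L : List (Nat × Nat)) (b : List α) :
    (appG d L b).length = b.length := by
  induction L generalizing b with
  | nil => rfl
  | cons p L ih => rw [appG_cons, ih, length_swG]

theorem getElem_swG {α : Type} (d : α) (b : List α) (p : Nat × Nat) (j : Nat)
    (hj : j < b.length) (h1 : p.1 < b.length) (h2 : p.2 < b.length) :
    (swG d b p)[j]'(by rw [length_swG]; exact hj) =
      if p.2 = j then b[p.1] else if p.1 = j then b[p.2] else b[j] := by
  simp only [swG, List.getD_eq_getElem b d h2, List.getD_eq_getElem b d h1,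
    List.getElem_set]

theorem swG_swG {α : Type} (d : α) (b : List α) (p : Nat × Nat)
    (h1 : p.1 < b.length) (h2 : p.2 < b.length) :
    swG d (swG d b p) p = b := by
  apply List.ext_getElem (by rw [length_swG, length_swG])
  intro j hj hj'
  have hjb : j < b.length := by rwa [length_swG, length_swG] at hj
  have h1' : p.1 < (swG d b p).length := by rwa [length_swG]
  have h2' : p.2 < (swG d b p).length := by rwa [length_swG]
  rw [getElem_swG d _ p j (by rwa [length_swG]) h1' h2']
  rw [getElem_swG d b p p.1 h1 h1 h2, getElem_swG d b p p.2 h2 h1 h2,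
    getElem_swG d b p j hjb h1 h2]
  split_ifs <;> simp_all

theorem forall_getElem_appG {α : Type} (P : α → Prop) (d : α) (L : List (Nat × Nat))
    (b : List α) (hL : ∀ p ∈ L, p.1 < b.length ∧ p.2 < b.length)
    (hb : ∀ (j : Nat) (hj : j < b.length), P b[j]) :
    ∀ (j : Nat) (hj : j < (appG d L b).length), P (appG d L b)[j] := by
  induction L generalizing b with
  | nil => exact hb
  | cons p L ih =>
    rw [appG_cons]
    have hp := hL p (by simp)
    refine ih (swG d b p) (fun q hq => ?_) (fun j hj => ?_)
    · rw [length_swG]; exact hL q (by simp [hq])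
    · have hjb : j < b.length := by rwa [length_swG] at hj
      rw [getElem_swG d b p j hjb hp.1 hp.2]
      split_ifs with hA hB
      · exact hb p.1 hp.1
      · exact hb p.2 hp.2
      · exact hb j hjb

theorem appG_map {α β : Type} (d : α) (d' : β) (f : α → β) (L : List (Nat × Nat))
    (l : List α) (hL : ∀ p ∈ L, p.1 < l.length ∧ p.2 < l.length) :
    appG d' L (l.map f) = (appG d L l).map f := by
  induction L generalizing l with
  | nil => rfl
  | cons p L ih =>
    have hp := hL p (by simp)
    rw [appG_cons, appG_cons]
    have hsw : swG d' (l.map f) p = (swG d l p).map f := by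
      simp only [swG, List.getD_eq_getElem l d hp.1, List.getD_eq_getElem l d hp.2,
        List.getD_eq_getElem (l.map f) d' (by simpa using hp.1),
        List.getD_eq_getElem (l.map f) d' (by simpa using hp.2),
        List.getElem_map, List.map_set]
    rw [hsw, ih (swG d l p) (fun q hq => by rw [length_swG]; exact hL q (by simp [hq]))]

theorem appG_rev {α : Type} (d : α) (L : List (Nat × Nat)) (l : List α)
    (hL : ∀ p ∈ L, p.1 < l.length ∧ p.2 < l.length) :
    appG d L (appG d L.reverse l) = l := by
  induction L with
  | nil => rfl
  | cons p L ih =>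
    have hp := hL p (by simp)
    rw [List.reverse_cons, appG_append, appG_cons]
    have hlen : (appG d L.reverse l).length = l.length := length_appG d _ l
    rw [show appG d [p] (appG d L.reverse l) = swG d (appG d L.reverse l) p from rfl]
    rw [swG_swG d _ p (by rw [hlen]; exact hp.1) (by rw [hlen]; exact hp.2)]
    exact ih (fun q hq => hL q (by simp [hq]))

theorem self_eq_map_range {α : Type} (d : α) (x : List α) :
    x = (List.range x.length).map (fun k => x.getD k d) := by
  apply List.ext_getElem (by simp)
  intro j hj hj'
  simp only [List.getElem_map, List.getElem_range]
  exact (List.getD_eq_getElem x d hj).symm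

-- the scatter loop leaves untouched positions unchanged
theorem scatter_untouched (block : List Int) (ps : List (Int × Int)) (r : List Int)
    (k : Nat) (h : ∀ p ∈ ps, p.2.toNat ≠ k) :
    (ps.foldl (fun r jk => r.set jk.2.toNat (PySem.List.pyGetD block jk.1 0)) r).getD k 0
      = r.getD k 0 := by
  induction ps generalizing r with
  | nil => rfl
  | cons p ps ih =>
    rw [List.foldl_cons, ih _ (fun q hq => h q (by simp [hq]))]
    simp only [List.getD_eq_getElem?_getD]
    rw [List.getElem?_set_ne (h p (by simp))]

theorem scatter_length (block : List Int) (ps : List (Int × Int)) (r : List Int) :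
    (ps.foldl (fun r jk => r.set jk.2.toNat (PySem.List.pyGetD block jk.1 0)) r).length
      = r.length := by
  induction ps generalizing r with
  | nil => rfl
  | cons p ps ih => rw [List.foldl_cons, ih]; simp

-- swap index of iteration i, as Int and as Nat, and the Nat-level swap list
def sW (key : List Int) (n : Nat) (i : Nat) : Int :=
  PySem.Int.mod (PySem.List.pyGetD key (PySem.Int.mod (i : Int) (key.length : Int)) 0 + (i : Int)) (n : Int)
def sNat (key : List Int) (n : Nat) (i : Nat) : Nat := (sW key n i).toNat
def LN (key : List Int) (n : Nat) : List (Nat × Nat) :=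
  (List.range n).map (fun i => (i, sNat key n i))

theorem sW_bounds (key : List Int) (n : Nat) (i : Nat) (hn : 0 < n) :
    0 ≤ sW key n i ∧ sW key n i < n := by
  unfold sW
  rw [PySem.Int.mod_eq_emod_of_pos (by exact_mod_cast hn)]
  exact ⟨Int.emod_nonneg _ (by exact_mod_cast hn.ne'), Int.emod_lt_of_pos _ (by exact_mod_cast hn)⟩

theorem sNat_lt (key : List Int) (n : Nat) (i : Nat) (hn : 0 < n) : sNat key n i < n := by
  have := sW_bounds key n i hn; unfold sNat; omega

theorem LN_bounds (key : List Int) (n : Nat) (hn : 0 < n) :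
    ∀ p ∈ LN key n, p.1 < n ∧ p.2 < n := by
  intro p hp
  simp only [LN, List.mem_map, List.mem_range] at hp
  obtain ⟨i, hi, rfl⟩ := hp
  exact ⟨hi, sNat_lt key n i hn⟩

-- A's port is the reversed Nat-level swap sequence applied to block
theorem A_bridge (block key : List Int) (hn : 0 < block.length) :
    shuffle_block_inverse block key = appG 0 (LN key block.length).reverse block := by
  simp only [shuffle_block_inverse, appG, LN]
  rw [← List.map_reverse, ← List.map_reverse, List.foldl_map, List.foldl_map]
  congr 1
  funext b i
  have hnn : (0:Int) ≤ sW key block.length i := (sW_bounds key block.length i hn).1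
  have e : PySem.List.pyGetD b (PySem.Int.mod (PySem.List.pyGetD key (PySem.Int.mod (i:Int) (key.length:Int)) 0 + (i:Int)) (block.length:Int)) 0
      = b.getD (sW key block.length i).toNat 0 := PySem.List.pyGetD_of_nonneg b 0 hnn
  simp only [pvSwapPairA, swG, PySem.List.pyGetD_natCast, Int.toNat_natCast, sNat, e]
  rfl

-- getD through a Nat→Int cast map
theorem getD_map_cast (q : List Nat) (j : Nat) :
    (q.map (fun (k : Nat) => (k : Int))).getD j 0 = ((q.getD j 0 : Nat) : Int) := by
  simp only [List.getD_eq_getElem?_getD, List.getElem?_map]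
  cases q[j]? <;> simp

-- B's perm loop is the forward Nat-level swap sequence applied to range n, cast to Int
theorem B_perm_aux (key : List Int) (n : Nat) (hn : 0 < n) (l : List Nat) (q : List Nat) :
    l.foldl (fun (p : List Int) (i : Nat) =>
      let s := PySem.Int.mod (PySem.List.pyGetD key (PySem.Int.mod (i : Int) (key.length : Int)) 0 + (i : Int)) (n : Int)
      let x := PySem.List.pyGetD p s 0
      let y := PySem.List.pyGetD p (i : Int) 0
      ((p.set i x).set s.toNat y)) (q.map (fun (k : Nat) => (k : Int)))
    = (l.foldl (fun q i => swG 0 q (i, sNat key n i)) q).map (fun (k : Nat) => (k : Int)) := by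
  induction l generalizing q with
  | nil => rfl
  | cons i l ih =>
    rw [List.foldl_cons, List.foldl_cons]
    have hstep : (let s := PySem.Int.mod (PySem.List.pyGetD key (PySem.Int.mod (i : Int) (key.length : Int)) 0 + (i : Int)) (n : Int)
        let x := PySem.List.pyGetD (q.map (fun (k : Nat) => (k : Int))) s 0
        let y := PySem.List.pyGetD (q.map (fun (k : Nat) => (k : Int))) (i : Int) 0
        (((q.map (fun (k : Nat) => (k : Int))).set i x).set s.toNat y))
        = (swG 0 q (i, sNat key n i)).map (fun (k : Nat) => (k : Int)) := by
      have hnn : (0:Int) ≤ sW key n i := (sW_bounds key n i hn).1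
      have e : PySem.List.pyGetD (q.map (fun (k : Nat) => (k : Int))) (PySem.Int.mod (PySem.List.pyGetD key (PySem.Int.mod (i:Int) (key.length:Int)) 0 + (i:Int)) (n:Int)) 0
          = (q.map (fun (k : Nat) => (k : Int))).getD (sW key n i).toNat 0 :=
        PySem.List.pyGetD_of_nonneg _ 0 hnn
      simp only [swG, PySem.List.pyGetD_natCast, sNat, getD_map_cast, List.map_set, e]
      rfl
    rw [hstep, ih]

-- forward and reversed permutation arrays
def sigF (key : List Int) (n : Nat) : List Nat := appG 0 (LN key n) (List.range n)
def sigR (key : List Int) (n : Nat) : List Nat := appG 0 (LN key n).reverse (List.range n)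

theorem length_sigF (key : List Int) (n : Nat) : (sigF key n).length = n := by
  rw [sigF, length_appG, List.length_range]

theorem length_sigR (key : List Int) (n : Nat) : (sigR key n).length = n := by
  rw [sigR, length_appG, List.length_range]

theorem getD_lt_sig (n : Nat) (L : List (Nat × Nat))
    (hL : ∀ p ∈ L, p.1 < n ∧ p.2 < n) (j : Nat) (hj : j < n) :
    (appG 0 L (List.range n)).getD j 0 < n := by
  have hlen : (appG 0 L (List.range n)).length = n := by rw [length_appG, List.length_range]
  rw [List.getD_eq_getElem _ 0 (by omega)]
  exact forall_getElem_appG (· < n) 0 L (List.range n)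
    (fun p hp => by simpa using hL p hp)
    (fun j hj => by simpa using hj) j (by omega)

-- applying a swap list to any length-n list is composition with its action on range n
theorem appG_comp {α : Type} (d : α) (n : Nat) (L : List (Nat × Nat)) (x : List α)
    (hx : x.length = n) (hL : ∀ p ∈ L, p.1 < n ∧ p.2 < n) :
    appG d L x = (appG 0 L (List.range n)).map (fun k => x.getD k d) := by
  conv_lhs => rw [self_eq_map_range d x, hx]
  exact appG_map 0 d _ L (List.range n) (fun p hp => by simpa using hL p hp)

theorem map_getD_eq_range (n : Nat) (m : List Nat) (g : Nat → Nat)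
    (hm : m.map g = List.range n) (j : Nat) (hj : j < n) : g (m.getD j 0) = j := by
  have hlen : m.length = n := by
    have := congrArg List.length hm; simpa using this
  have hj' : j < m.length := by omega
  rw [List.getD_eq_getElem m 0 hj']
  have h1 := List.getElem_of_eq hm (i := j) (by rw [List.length_map, hlen]; exact hj)
  simpa using h1

theorem sig_inj (key : List Int) (n : Nat) (hn : 0 < n) (j : Nat) (hj : j < n) :
    (sigR key n).getD ((sigF key n).getD j 0) 0 = j := by
  refine map_getD_eq_range n (sigF key n) (fun t => (sigR key n).getD t 0) ?_ j hj
  simp only [sigF]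
  rw [← appG_comp 0 n (LN key n) (sigR key n) (length_sigR key n) (LN_bounds key n hn), sigR]
  exact appG_rev 0 (LN key n) (List.range n)
    (fun p hp => by simpa using LN_bounds key n hn p hp)

theorem sig_sur (key : List Int) (n : Nat) (hn : 0 < n) (k : Nat) (hk : k < n) :
    (sigF key n).getD ((sigR key n).getD k 0) 0 = k := by
  refine map_getD_eq_range n (sigR key n) (fun t => (sigF key n).getD t 0) ?_ k hk
  simp only [sigR]
  have hb : ∀ p ∈ (LN key n).reverse, p.1 < n ∧ p.2 < n :=
    fun p hp => LN_bounds key n hn p (List.mem_reverse.mp hp)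
  rw [← appG_comp 0 n (LN key n).reverse (sigF key n) (length_sigF key n) hb, sigF]
  have := appG_rev 0 (LN key n).reverse (List.range n)
    (fun p hp => by simpa using hb p hp)
  rwa [List.reverse_reverse] at this

-- evaluating the scatter loop at position k, when iteration j0 is the last to write it
theorem scatter_eval (block : List Int) (perm : List Int) (n k j0 : Nat)
    (hpl : perm.length = n) (hk : k < n) (hj0 : j0 < n)
    (hhit : (perm[j0]'(by omega)).toNat = k)
    (hmiss : ∀ (j' : Nat), j0 < j' → (h2 : j' < n) → (perm[j']'(by omega)).toNat ≠ k) :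
    ((PySem.List.enumerate perm 0).foldl
      (fun (r : List Int) (jk : Int × Int) => r.set jk.2.toNat (PySem.List.pyGetD block jk.1 0))
      (List.replicate n 0)).getD k 0 = PySem.List.pyGetD block ((j0 : Nat) : Int) 0 := by
  have hj0' : j0 < perm.length := by omega
  have hsplit : perm = perm.take j0 ++ perm[j0] :: perm.drop (j0 + 1) := by
    conv_lhs => rw [← List.take_append_drop j0 perm]
    rw [List.getElem_cons_drop]
  have hlt : (perm.take j0).length = j0 := by
    rw [List.length_take]; omega
  conv_lhs => rw [hsplit]
  rw [PySem.List.enumerate_append, List.foldl_append, PySem.List.enumerate_cons,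
    List.foldl_cons, hlt]
  rw [scatter_untouched]
  · have hlen1 : ((PySem.List.enumerate (perm.take j0) 0).foldl
        (fun (r : List Int) (jk : Int × Int) => r.set jk.2.toNat (PySem.List.pyGetD block jk.1 0))
        (List.replicate n 0)).length = n := by
      rw [scatter_length, List.length_replicate]
    rw [hhit, List.getD_eq_getElem _ 0 (by simpa [hlen1] using hk), List.getElem_set]
    simp
  · intro p hp
    rw [PySem.List.mem_enumerate_iff] at hp
    obtain ⟨t, ht, rfl⟩ := hp
    have ht' : t < n - (j0 + 1) := by simpa [List.length_drop, hpl] using ht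
    have hget : (perm.drop (j0 + 1))[t]'ht = perm[j0 + 1 + t]'(by omega) := by
      rw [List.getElem_drop]
    simp only [hget]
    exact hmiss (j0 + 1 + t) (by omega) (by omega)

-- the two ports agree on every input
theorem ports_agree (block key : List Int) :
    shuffle_block_inverse block key = shuffle_block_inverse_alt block key := by
  rcases Nat.eq_zero_or_pos block.length with h0 | hn
  · have hb : block = [] := List.eq_nil_of_length_eq_zero h0
    subst hb; rfl
  · have hA : shuffle_block_inverse block key
        = (sigR key block.length).map (fun k => block.getD k 0) := by
      rw [A_bridge block key hn,
        appG_comp 0 block.length (LN key block.length).reverse block rfl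
          (fun p hp => LN_bounds key block.length hn p (List.mem_reverse.mp hp)), sigR]
    have hB : shuffle_block_inverse_alt block key
        = (PySem.List.enumerate ((sigF key block.length).map (fun (k : Nat) => (k : Int))) 0).foldl
            (fun (r : List Int) (jk : Int × Int) => r.set jk.2.toNat (PySem.List.pyGetD block jk.1 0))
            (List.replicate block.length 0) := by
      simp only [shuffle_block_inverse_alt]
      rw [B_perm_aux key block.length hn (List.range block.length) (List.range block.length),
        sigF, LN, appG]
      rw [List.foldl_map]
    rw [hA, hB]
    apply List.ext_getElem
    · rw [List.length_map, length_sigR, scatter_length, List.length_replicate]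
    intro k hk1 hk2
    have hk : k < block.length := by simpa [length_sigR] using hk1
    have hj0 : (sigR key block.length).getD k 0 < block.length :=
      getD_lt_sig block.length _ (fun p hp =>
        LN_bounds key block.length hn p (List.mem_reverse.mp hp)) k hk
    rw [← List.getD_eq_getElem _ (0 : Int) hk2]
    rw [scatter_eval block _ block.length k ((sigR key block.length).getD k 0)
        (by simp [length_sigF]) hk hj0 ?_ ?_]
    · have hkr : k < (sigR key block.length).length := by rw [length_sigR]; exact hk
      rw [PySem.List.pyGetD_natCast, List.getElem_map,
        List.getD_eq_getElem (sigR key block.length) 0 hkr]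
    · rw [List.getElem_map, Int.toNat_natCast,
        ← List.getD_eq_getElem (sigF key block.length) 0]
      exact sig_sur key block.length hn k hk
    · intro j' hlt hj'
      rw [List.getElem_map, Int.toNat_natCast]
      intro hcontra
      have h1 : (sigF key block.length).getD j' 0 = k := by
        rwa [List.getD_eq_getElem (sigF key block.length) 0 (by rw [length_sigF]; exact hj')]
      have h2 := sig_inj key block.length hn j' hj'
      rw [h1] at h2
      omega

-- ===== VERDICT =====
theorem shuffle_block_inverse_spec : Claim_equal_shuffle_block_inverse := by
  intro block key _ _
  unfold Spec_shuffle_block_inverse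
  exact ports_agree block key
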